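-- pv_equiv track=rewrite | github.com/midstar/AoC | 2024/22B.py | next_sec_num_req
-- ===== SOURCE A (Python) =====
-- def next_sec_num(sec_num):
--     sec_num = (sec_num ^ (sec_num * 64)) % 16777216
--     sec_num = (sec_num ^ int(sec_num / 32)) % 16777216
--     sec_num = (sec_num ^ (sec_num * 2048)) % 16777216
--     return sec_num
--
-- def next_sec_num_req(seq_out, sec_num, times, p1 = None, p2 = None, p3 = None, p4 = None):
--     sec_num = next_sec_num(sec_num)
--     p = sec_num % 10
--     if p1 != None:
--         seq = (p2 - p1, p3 - p2, p4 - p3, p - p4)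
--         if seq not in seq_out:
--             seq_out[seq] = p
--
--     if times == 1: return sec_num
--     return next_sec_num_req(seq_out, sec_num, times - 1, p2, p3, p4, p)
-- ===== SOURCE B (Python) =====
-- # Staged two-pass re-implementation: pass 1 materialises the whole secret-number list,
-- # pass 2 scans a prices list by index to fill seq_out; return is the last secret.
-- # Mutates seq_out in place exactly like the original (return-value equivalence).
--
-- def _xorshift_step(s):
--     s = (s ^ (s << 6)) & 0xFFFFFF
--     s = (s ^ (s >> 5)) & 0xFFFFFF
--     s = (s ^ (s << 11)) & 0xFFFFFF
--     return s
--
-- def next_sec_num_req(seq_out, sec_num, times, p1 = None, p2 = None, p3 = None, p4 = None):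
--     # pass 1: all secret numbers
--     secrets = []
--     s = sec_num
--     for _ in range(times):
--         s = _xorshift_step(s)
--         secrets.append(s)
--     # pass 2: prices (seed window then one price per secret), indexed delta scan
--     prices = [p1, p2, p3, p4] + [x % 10 for x in secrets]
--     for i in range(len(secrets)):
--         if prices[i] is not None:
--             seq = (prices[i + 1] - prices[i], prices[i + 2] - prices[i + 1],
--                    prices[i + 3] - prices[i + 2], prices[i + 4] - prices[i + 3])
--             if seq not in seq_out:
--                 seq_out[seq] = prices[i + 4]
--     return secrets[-1]
-- ===== Notes on version B (the rewrite author's own statement) =====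
-- stated objective: alternative
-- what changed: The single recursive pass is replaced by two staged passes: first materialise the full list of secret numbers (with the update rewritten as xorshift/mask bit operations), then build a prices list and fill seq_out by an indexed scan over 5-price windows; the result is the last element of the secrets list instead of the recursion's return.
import Mathlib
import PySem

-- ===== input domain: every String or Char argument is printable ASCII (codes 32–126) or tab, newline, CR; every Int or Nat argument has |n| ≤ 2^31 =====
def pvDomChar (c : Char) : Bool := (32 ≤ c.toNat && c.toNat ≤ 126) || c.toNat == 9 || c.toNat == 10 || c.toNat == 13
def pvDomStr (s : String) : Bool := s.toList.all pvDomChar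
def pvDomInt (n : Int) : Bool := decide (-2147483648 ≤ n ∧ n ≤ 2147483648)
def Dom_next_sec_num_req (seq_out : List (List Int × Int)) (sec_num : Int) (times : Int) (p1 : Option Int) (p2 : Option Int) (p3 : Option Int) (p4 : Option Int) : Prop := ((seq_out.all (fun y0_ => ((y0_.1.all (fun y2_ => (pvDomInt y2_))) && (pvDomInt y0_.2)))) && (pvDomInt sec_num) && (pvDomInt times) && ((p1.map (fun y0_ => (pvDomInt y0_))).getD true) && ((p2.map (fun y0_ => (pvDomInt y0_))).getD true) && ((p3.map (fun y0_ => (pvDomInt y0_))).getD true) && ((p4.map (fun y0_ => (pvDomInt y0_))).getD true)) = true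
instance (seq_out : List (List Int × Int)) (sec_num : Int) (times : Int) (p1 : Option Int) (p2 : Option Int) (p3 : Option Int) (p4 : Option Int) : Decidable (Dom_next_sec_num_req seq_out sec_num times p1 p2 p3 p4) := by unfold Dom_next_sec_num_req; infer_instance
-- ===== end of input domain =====

-- B replaces A's single recursive pass by two staged passes (materialise the secrets list,
-- then an indexed window scan filling the dict) and returns the list's last element;
-- return-value equivalence only — both Pythons mutate seq_out in place the same way.

-- ===== PORT A =====
-- helper next_sec_num of A; int(sec_num / 32) is ported by PySem.Int.truncdiv, exact since
-- its argument is (· % 16777216), i.e. in [0, 2^24) < 2^53.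
def pyNextSecNum (sec_num : Int) : Int :=
  let s1 := PySem.Int.mod (PySem.Int.bxor sec_num (sec_num * 64)) 16777216
  let s2 := PySem.Int.mod (PySem.Int.bxor s1 (PySem.Int.truncdiv s1 32)) 16777216
  PySem.Int.mod (PySem.Int.bxor s2 (s2 * 2048)) 16777216

-- A's recursion, fuelled by times.toNat (the recursion consumes exactly times calls when
-- 1 ≤ times; fuel 0 is unreachable under Pre_). `p2 - p1` etc. are ported with .getD 0,
-- exact under Pre_ (there p2,p3,p4 are all `some` whenever the p1-branch is taken).
def goA : Nat → PySem.Dict (List Int) Int → Int → Int → Option Int → Option Int → Option Int → Option Int → Int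
  | 0, _, s, _, _, _, _, _ => s
  | f+1, d, s, t, p1, p2, p3, p4 =>
    let s := pyNextSecNum s
    let p := PySem.Int.mod s 10
    let d := match p1 with
      | some v1 =>
        let seq := [p2.getD 0 - v1, p3.getD 0 - p2.getD 0, p4.getD 0 - p3.getD 0, p - p4.getD 0]
        if d.contains seq then d else d.insert seq p
      | none => d
    if t = 1 then s else goA f d s (t - 1) p2 p3 p4 (some p)

def next_sec_num_req (seq_out : List (List Int × Int)) (sec_num : Int) (times : Int) (p1 : Option Int) (p2 : Option Int) (p3 : Option Int) (p4 : Option Int) : Int :=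
  goA times.toNat (PySem.Dict.mk seq_out) sec_num times p1 p2 p3 p4

-- ===== PORT B =====
def xorshiftStep (s : Int) : Int :=
  let s := PySem.Int.band (PySem.Int.bxor s (s <<< (6:Nat))) 16777215
  let s := PySem.Int.band (PySem.Int.bxor s (s >>> (5:Nat))) 16777215
  PySem.Int.band (PySem.Int.bxor s (s <<< (11:Nat))) 16777215

-- pass 1 of Source B: `for _ in range(times): s = _xorshift_step(s); secrets.append(s)`
def genSecrets : Nat → Int → List Int → List Int
  | 0, _, acc => acc
  | n+1, s, acc => genSecrets n (xorshiftStep s) (acc ++ [xorshiftStep s])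

-- pass 2 of Source B: indexed scan over 5-price windows, filling the dict; `prices[i] - …` is
-- ported with .getD 0, exact under Pre_ (all window entries are `some` when entry i is).
def fillDict (d : PySem.Dict (List Int) Int) (prices : List (Option Int)) (n : Nat) : PySem.Dict (List Int) Int :=
  (PySem.List.pyRange 0 n 1).foldl (fun d i =>
    match PySem.List.pyGetD prices i none with
    | some v0 =>
      let v1 := (PySem.List.pyGetD prices (i+1) none).getD 0
      let v2 := (PySem.List.pyGetD prices (i+2) none).getD 0
      let v3 := (PySem.List.pyGetD prices (i+3) none).getD 0
      let v4 := (PySem.List.pyGetD prices (i+4) none).getD 0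
      let seq := [v1 - v0, v2 - v1, v3 - v2, v4 - v3]
      if d.contains seq then d else d.insert seq v4
    | none => d) d

-- `secrets[-1]` is ported by pyGet? … (-1) with default 0, exact under Pre_ (times ≥ 1
-- makes secrets nonempty; on the empty list Python raises IndexError, excluded by Pre_).
def next_sec_num_req_alt (seq_out : List (List Int × Int)) (sec_num : Int) (times : Int) (p1 : Option Int) (p2 : Option Int) (p3 : Option Int) (p4 : Option Int) : Int :=
  let secrets := genSecrets times.toNat sec_num []
  let prices := [p1, p2, p3, p4] ++ secrets.map (fun x => some (PySem.Int.mod x 10))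
  let _d := fillDict (PySem.Dict.mk seq_out) prices secrets.length
  (PySem.List.pyGet? secrets (-1)).getD 0

-- ===== PRECONDITION & SPEC =====
-- Pre_ excludes times ≤ 0 (A recurses forever / RecursionError) and the option patterns on
-- which A raises TypeError: a window position holding `some` followed, within reach of
-- `times` iterations, by a later position holding `none` (then `p2 - p1` subtracts None).
def Pre_next_sec_num_req (seq_out : List (List Int × Int)) (sec_num : Int) (times : Int) (p1 : Option Int) (p2 : Option Int) (p3 : Option Int) (p4 : Option Int) : Prop :=
  1 ≤ times ∧
  (p1.isSome → p2.isSome ∧ p3.isSome ∧ p4.isSome) ∧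
  (2 ≤ times → p2.isSome → p3.isSome ∧ p4.isSome) ∧
  (3 ≤ times → p3.isSome → p4.isSome)
instance (seq_out : List (List Int × Int)) (sec_num : Int) (times : Int) (p1 : Option Int) (p2 : Option Int) (p3 : Option Int) (p4 : Option Int) : Decidable (Pre_next_sec_num_req seq_out sec_num times p1 p2 p3 p4) := by unfold Pre_next_sec_num_req; infer_instance

def pvWitness_next_sec_num_req : (List (List Int × Int)) × Int × Int × Option Int × Option Int × Option Int × Option Int :=
  ([], 123, 5, some 3, some 0, some 6, some 5)

def Spec_next_sec_num_req (seq_out : List (List Int × Int)) (sec_num : Int) (times : Int) (p1 : Option Int) (p2 : Option Int) (p3 : Option Int) (p4 : Option Int) (out : Int) : Prop := out = next_sec_num_req_alt seq_out sec_num times p1 p2 p3 p4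
instance (seq_out : List (List Int × Int)) (sec_num : Int) (times : Int) (p1 : Option Int) (p2 : Option Int) (p3 : Option Int) (p4 : Option Int) (out : Int) : Decidable (Spec_next_sec_num_req seq_out sec_num times p1 p2 p3 p4 out) := by unfold Spec_next_sec_num_req; infer_instance

-- ===== CLAIM (what is proved, stated in full; the proofs are below) =====
def Claim_equal_next_sec_num_req : Prop := ∀ (seq_out : List (List Int × Int)) (sec_num : Int) (times : Int) (p1 : Option Int) (p2 : Option Int) (p3 : Option Int) (p4 : Option Int), Dom_next_sec_num_req seq_out sec_num times p1 p2 p3 p4 → Pre_next_sec_num_req seq_out sec_num times p1 p2 p3 p4 → Spec_next_sec_num_req seq_out sec_num times p1 p2 p3 p4 (next_sec_num_req seq_out sec_num times p1 p2 p3 p4)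

-- ===== LEMMAS AND PROOFS =====

-- n-fold application of the secret-number update (proof-only abstraction)
def stepIter : Nat → Int → Int
  | 0, s => s
  | n+1, s => stepIter n (pyNextSecNum s)

-- Python's `x & (2^24 - 1)` equals `x % 2^24` on every int (two's complement).
lemma band_mask_eq_mod (x : Int) : PySem.Int.band x 16777215 = PySem.Int.mod x 16777216 := by
  have hf : Int.fmod x 16777216 = x % 16777216 := by rw [Int.fmod_eq_emod]; norm_num
  unfold PySem.Int.band PySem.Int.mod
  rw [hf]
  by_cases h : 0 ≤ x
  · simp only [if_pos h, if_pos (by norm_num : (0:Int) ≤ 16777215)]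
    have h2 : x.toNat &&& (16777215:Int).toNat = x.toNat % 16777216 := by
      have := Nat.and_two_pow_sub_one_eq_mod x.toNat 24
      norm_num at this ⊢
      exact this
    rw [h2]; omega
  · simp only [if_neg h, if_pos (by norm_num : (0:Int) ≤ 16777215)]
    have h2 : (16777215:Int).toNat &&& (-x-1).toNat = (-x-1).toNat % 16777216 := by
      rw [Nat.and_comm]
      have := Nat.and_two_pow_sub_one_eq_mod (-x-1).toNat 24
      norm_num at this ⊢
      exact this
    rw [h2]; omega

lemma step_eq (s : Int) : xorshiftStep s = pyNextSecNum s := by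
  have hX : 0 ≤ PySem.Int.bxor s (s * 64) % 16777216 :=
    Int.emod_nonneg _ (by norm_num)
  have hsr : (PySem.Int.bxor s (s * 64) % 16777216) >>> (5:Nat)
      = PySem.Int.truncdiv (PySem.Int.bxor s (s * 64) % 16777216) 32 := by
    simp only [PySem.Int.truncdiv]
    rw [Int.shiftRight_eq_div_pow, Int.tdiv_eq_ediv_of_nonneg hX]
    norm_num
  simp only [xorshiftStep, pyNextSecNum, band_mask_eq_mod, Int.shiftLeft_eq]
  norm_num [hsr]

-- A's recursion returns the times-fold update of sec_num (fuel equals times under Pre_).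
lemma goA_eq_stepIter : ∀ (f : Nat) (d : PySem.Dict (List Int) Int) (s t : Int)
    (p1 p2 p3 p4 : Option Int), 1 ≤ t → t.toNat = f →
    goA f d s t p1 p2 p3 p4 = stepIter f s := by
  intro f
  induction f with
  | zero => intro d s t _ _ _ _ h1 hf; omega
  | succ f ih =>
    intro d s t p1 p2 p3 p4 h1 hf
    simp only [goA]
    split_ifs with ht
    · have : f = 0 := by omega
      subst this ht; rfl
    · exact ih _ _ (t - 1) _ _ _ _ (by omega) (by omega)

-- B's first pass ends at the times-fold update of sec_num.
lemma genSecrets_last : ∀ (n : Nat) (s : Int) (acc : List Int), 1 ≤ n →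
    (genSecrets n s acc).getLast? = some (stepIter n s) := by
  intro n
  induction n with
  | zero => intro _ _ h; omega
  | succ n ih =>
    intro s acc _
    by_cases hn : 1 ≤ n
    · simpa [genSecrets, stepIter, step_eq] using ih (xorshiftStep s) _ hn
    · have : n = 0 := by omega
      subst this
      simp [genSecrets, stepIter, step_eq]

-- ===== VERDICT (by name: the statement is the Claim_ definition above) =====
theorem next_sec_num_req_spec : Claim_equal_next_sec_num_req := by
  intro seq_out sec_num times p1 p2 p3 p4 _hDom hPre
  have hg := genSecrets_last times.toNat sec_num [] (by have := hPre.1; omega)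
  simp only [Spec_next_sec_num_req, next_sec_num_req, next_sec_num_req_alt,
    PySem.List.pyGet?_neg_one, hg, Option.getD_some,
    goA_eq_stepIter times.toNat _ sec_num times p1 p2 p3 p4 hPre.1 rfl]
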